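-- pv_equiv track=rewrite | github.com/Chocapikk/LeakPy | leakpy/helpers/display.py | _categorize_fields
-- ===== SOURCE A (Python) =====
-- def _categorize_fields(fields):
--     """Group fields by their top-level category prefix."""
--     categories = {}
--     root_fields = []
--
--     for field in fields:
--         if '.' in field:
--             prefix = field.split('.')[0]
--             categories.setdefault(prefix, []).append(field)
--         else:
--             root_fields.append(field)
--
--     return root_fields, sorted(categories.items())
-- ===== SOURCE B (Python) =====
-- def _categorize_fields(fields):
--     """Group fields by their top-level category prefix."""
--     items = list(fields)
--     prefixes = sorted({f.split('.')[0] for f in items if '.' in f})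
--     categories = [(p, [f for f in items if '.' in f and f.split('.')[0] == p])
--                   for p in prefixes]
--     root_fields = [f for f in items if '.' not in f]
--     return root_fields, categories
-- ===== Notes on version B (the rewrite author's own statement) =====
-- stated objective: alternative
-- what changed: Replaces A's single-pass setdefault dict accumulation (then sorting the items) by first computing the sorted list of distinct top-level prefixes and building each category with its own order-preserving filter scan over the list; root fields become a plain filter.
import Mathlib
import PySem

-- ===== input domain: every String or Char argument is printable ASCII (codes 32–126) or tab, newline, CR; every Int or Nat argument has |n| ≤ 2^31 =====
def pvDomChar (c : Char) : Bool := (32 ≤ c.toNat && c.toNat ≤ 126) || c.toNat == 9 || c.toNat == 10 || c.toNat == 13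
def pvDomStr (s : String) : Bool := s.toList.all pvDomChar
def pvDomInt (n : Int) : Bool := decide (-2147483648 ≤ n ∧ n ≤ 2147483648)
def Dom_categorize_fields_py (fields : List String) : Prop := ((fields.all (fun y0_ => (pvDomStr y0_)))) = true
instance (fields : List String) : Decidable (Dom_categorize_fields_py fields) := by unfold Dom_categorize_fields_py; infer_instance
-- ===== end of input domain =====

-- B replaces A's one-pass setdefault accumulation by computing the sorted distinct prefixes first and
-- building each category by its own order-preserving filter scan (objective: alternative, same observable result).

-- shared helpers: '.' in field, and field.split('.')[0]
def pvHasDot (f : String) : Bool := PySem.Str.isIn "." f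
-- split? is `some` since the separator "." is nonempty, and s.split('.') is never empty, so [0] = headD ""
def pvPfx (f : String) : String := ((PySem.Str.split? f ".").getD []).headD ""

-- ===== PORT A =====
-- loop body of A's single pass; setdefault(prefix, []).append(field) ends with d[prefix] = old ++ [field],
-- keeping the key's position if present (Dict.insert overwrites in place), else appending the key
def pvStepA (st : PySem.Dict String (List String) × List String) (field : String) :
    PySem.Dict String (List String) × List String :=
  if pvHasDot field then
    let pre := pvPfx field
    (st.1.insert pre (st.1.getD pre [] ++ [field]), st.2)
  else
    (st.1, st.2 ++ [field])

def categorize_fields_py (fields : List String) : List String × (List (String × List String)) :=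
  let st := fields.foldl pvStepA (PySem.Dict.empty, [])
  -- sorted(categories.items()): Python tuple comparison = first key, then value (sorted2)
  (st.2, PySem.List.sorted2 st.1.items (fun p => p.1) (fun p => p.2))

-- ===== PORT B =====
def categorize_fields_py_alt (fields : List String) : List String × (List (String × List String)) :=
  let prefixes := PySem.List.sorted
    (PySem.Set.ofList ((fields.filter (fun f => pvHasDot f)).map pvPfx)) (fun x => x)
  let categories := prefixes.map (fun p => (p, fields.filter (fun f => pvHasDot f && pvPfx f == p)))
  let root_fields := fields.filter (fun f => !pvHasDot f)
  (root_fields, categories)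

-- ===== PRECONDITION & SPEC =====
def Spec_categorize_fields_py (fields : List String) (out : List String × (List (String × List String))) : Prop := out = categorize_fields_py_alt fields
instance (fields : List String) (out : List String × (List (String × List String))) : Decidable (Spec_categorize_fields_py fields out) := by unfold Spec_categorize_fields_py; infer_instance

-- ===== CLAIM (what is proved, stated in full; the proofs are below) =====
def Claim_equal_categorize_fields_py : Prop := ∀ (fields : List String), Dom_categorize_fields_py fields → Spec_categorize_fields_py fields (categorize_fields_py fields)

-- ===== LEMMAS AND PROOFS =====

-- the distinct prefixes seen so far, and the group belonging to one prefix
def pvS (l : List String) : List String :=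
  PySem.Set.ofList ((l.filter (fun f => pvHasDot f)).map pvPfx)

def pvGrp (l : List String) (p : String) : List String :=
  l.filter (fun f => pvHasDot f && pvPfx f == p)

lemma pvGrp_append_one (l : List String) (f : String) (p : String) :
    pvGrp (l ++ [f]) p = pvGrp l p ++ (if pvHasDot f && pvPfx f == p then [f] else []) := by
  simp [pvGrp, List.filter_append]
  split_ifs with h <;> simp [h]

lemma pvS_mem_iff (l : List String) (p : String) :
    p ∈ pvS l ↔ p ∈ (l.filter (fun f => pvHasDot f)).map pvPfx := by
  simp [pvS, PySem.Set.mem_ofList]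

lemma pvGrp_eq_nil_of_not_mem (l : List String) (p : String) (h : p ∉ pvS l) :
    pvGrp l p = [] := by
  rw [pvS_mem_iff] at h
  refine List.filter_eq_nil_iff.mpr ?_
  intro f hf hcond
  simp only [Bool.and_eq_true, beq_iff_eq] at hcond
  exact h (List.mem_map.mpr ⟨f, List.mem_filter.mpr ⟨hf, hcond.1⟩, hcond.2⟩)

lemma pv_fold_inv (fields : List String) :
    ∀ (l : List String) (d : PySem.Dict String (List String)) (roots : List String),
      d.items = (pvS l).map (fun p => (p, pvGrp l p)) →
      roots = l.filter (fun f => !pvHasDot f) →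
      (fields.foldl pvStepA (d, roots)).1.items
        = (pvS (l ++ fields)).map (fun p => (p, pvGrp (l ++ fields) p)) ∧
      (fields.foldl pvStepA (d, roots)).2
        = (l ++ fields).filter (fun f => !pvHasDot f) := by
  induction fields with
  | nil =>
      intro l d roots h1 h2
      simpa using ⟨h1, h2⟩
  | cons f rest ih =>
      intro l d roots h1 h2
      have hkeys : d.keys = pvS l := by
        simp only [PySem.Dict.keys, h1, List.map_map]
        rw [show ((fun (x : String × List String) => x.1) ∘ fun p => (p, pvGrp l p)) = id from rfl,
            List.map_id]
      have hnodup : d.keys.Nodup := by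
        rw [hkeys]; unfold pvS; exact PySem.Set.nodup_ofList _
      have hcont : ∀ p, d.contains p = decide (p ∈ pvS l) := fun p => by
        rw [PySem.Dict.contains_eq_decide_mem_keys, hkeys]
      have hsplit : l ++ f :: rest = (l ++ [f]) ++ rest := by simp
      rw [hsplit]
      simp only [List.foldl_cons]
      by_cases hd : pvHasDot f
      · -- field with a dot: setdefault + append
        have hstep : pvStepA (d, roots) f
            = (d.insert (pvPfx f) (d.getD (pvPfx f) [] ++ [f]), roots) := by
          unfold pvStepA; rw [if_pos hd]
        rw [hstep]
        have hS2 : pvS (l ++ [f]) = PySem.Set.add (pvS l) (pvPfx f) := by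
          simp [pvS, List.filter_append, hd, PySem.Set.ofList_append, PySem.Set.update]
        refine ih (l ++ [f]) _ roots ?_ ?_
        · by_cases hmem : pvPfx f ∈ pvS l
          · have hct : d.contains (pvPfx f) = true := by rw [hcont]; simpa using hmem
            have hadd : PySem.Set.add (pvS l) (pvPfx f) = pvS l := by
              simp [PySem.Set.add, hmem]
            have hgd : d.getD (pvPfx f) [] = pvGrp l (pvPfx f) :=
              PySem.Dict.getD_of_mem_items d
                (by rw [h1]; exact List.mem_map.mpr ⟨pvPfx f, hmem, rfl⟩) hnodup []
            rw [PySem.Dict.items_insert_of_contains d _ hct, h1, List.map_map,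
                hS2, hadd]
            refine List.map_congr_left ?_
            intro q hq
            by_cases hq0 : q = pvPfx f
            · subst hq0
              simp [hgd, pvGrp_append_one, hd]
            · simp [pvGrp_append_one, hd, Ne.symm hq0]
              exact hq0
          · have hcf : d.contains (pvPfx f) = false := by rw [hcont]; simpa using hmem
            have hadd : PySem.Set.add (pvS l) (pvPfx f) = pvS l ++ [pvPfx f] := by
              simp [PySem.Set.add, hmem]
            rw [PySem.Dict.items_insert_of_not_contains d _ hcf,
                PySem.Dict.getD_of_not_contains d _ hcf, h1, hS2, hadd, List.map_append]
            congr 1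
            · refine List.map_congr_left ?_
              intro q hq
              have hq0 : q ≠ pvPfx f := fun h => hmem (h ▸ hq)
              simp [pvGrp_append_one, hd, Ne.symm hq0]
            · simp [pvGrp_append_one, hd, pvGrp_eq_nil_of_not_mem l _ hmem]
        · simp [List.filter_append, hd, h2]
      · -- field without a dot: goes to root_fields
        have hstep : pvStepA (d, roots) f = (d, roots ++ [f]) := by
          unfold pvStepA; rw [if_neg hd]
        rw [hstep]
        refine ih (l ++ [f]) d (roots ++ [f]) ?_ ?_
        · have hS : pvS (l ++ [f]) = pvS l := by
            simp [pvS, List.filter_append, hd]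
          have hg : ∀ p, pvGrp (l ++ [f]) p = pvGrp l p := fun p => by
            simp [pvGrp_append_one, hd]
          rw [hS, h1]
          exact (List.map_congr_left (fun q _ => by rw [hg q])).symm
        · simp [List.filter_append, hd, h2]

-- the comparison sorted2 uses agrees with sorted's on our items (first components are distinct)
lemma pv_insertBy_congr {α : Type} (b1 b2 : α → α → Bool) (x : α) (acc : List α)
    (h : ∀ c ∈ acc, b1 x c = b2 x c) :
    PySem.List.insertBy b1 x acc = PySem.List.insertBy b2 x acc := by
  induction acc with
  | nil => rfl
  | cons y ys ih =>
      simp only [PySem.List.insertBy, h y (by simp)]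
      split
      · rfl
      · simp only [List.cons.injEq, true_and]
        exact ih (fun c hc => h c (by simp [hc]))

lemma pv_foldl_insertBy_congr {α : Type} (b1 b2 : α → α → Bool) (xs : List α) :
    ∀ acc : List α,
      (∀ a ∈ xs, ∀ c ∈ acc, b1 a c = b2 a c) →
      (∀ a ∈ xs, ∀ c ∈ xs, b1 a c = b2 a c) →
      xs.foldl (fun acc x => PySem.List.insertBy b1 x acc) acc
        = xs.foldl (fun acc x => PySem.List.insertBy b2 x acc) acc := by
  induction xs with
  | nil => intro acc _ _; rfl
  | cons x rest ih =>
      intro acc hacc hxs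
      simp only [List.foldl_cons]
      rw [pv_insertBy_congr b1 b2 x acc (fun c hc => hacc x (by simp) c hc)]
      refine ih (PySem.List.insertBy b2 x acc) ?_ ?_
      · intro a ha c hc
        rcases (PySem.List.mem_insertBy b2 x c acc).mp hc with rfl | hc
        · exact hxs a (by simp [ha]) c (by simp)
        · exact hacc a (by simp [ha]) c hc
      · intro a ha c hc
        exact hxs a (by simp [ha]) c (by simp [hc])

lemma pv_sorted2_eq_sorted (S : List String) (g : String → List String)  :
    PySem.List.sorted2 (S.map (fun p => (p, g p))) (fun p => p.1) (fun p => p.2)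
      = PySem.List.sorted (S.map (fun p => (p, g p))) (fun p => p.1) := by
  have hinj : ∀ a ∈ S.map (fun p => (p, g p)), ∀ c ∈ S.map (fun p => (p, g p)),
      (decide (a.1 < c.1) || (!decide (c.1 < a.1) && decide (a.2 < c.2)))
        = decide (a.1 < c.1) := by
    intro a ha c hc
    obtain ⟨p, hp, rfl⟩ := List.mem_map.mp ha
    obtain ⟨q, hq, rfl⟩ := List.mem_map.mp hc
    rcases lt_trichotomy p q with h | h | h
    · simp [h]
    · subst h
      simp
    · simp [h, not_lt_of_gt h]
  simp only [PySem.List.sorted2, PySem.List.sorted]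
  exact pv_foldl_insertBy_congr _ _ _ [] (by intro a _ c hc; simp at hc) hinj

lemma pv_sorted_items (xs : List String) (g : String → List String) :
    PySem.List.sorted ((PySem.Set.ofList xs : List String).map (fun p => (p, g p))) (fun p => p.1)
      = (PySem.List.sorted (PySem.Set.ofList xs : List String) (fun x => x)).map (fun p => (p, g p)) := by
  apply PySem.List.sorted_eq_of_perm_of_pairwise_lt
  · exact (PySem.List.sorted_perm _ _ _).map _
  · exact List.pairwise_map.mpr (PySem.List.sorted_ofList_pairwise_lt xs)

-- ===== VERDICT (by name: the statement is the Claim_ definition above) =====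
theorem categorize_fields_py_spec : Claim_equal_categorize_fields_py := by
  intro fields _
  show categorize_fields_py fields = categorize_fields_py_alt fields
  obtain ⟨h1, h2⟩ := pv_fold_inv fields [] PySem.Dict.empty []
    (by simp [pvS, PySem.Set.ofList]; rfl) rfl
  simp only [List.nil_append] at h1 h2
  unfold categorize_fields_py categorize_fields_py_alt
  refine Prod.ext h2 ?_
  show PySem.List.sorted2 _ _ _ = _
  rw [h1, pv_sorted2_eq_sorted (pvS fields) (pvGrp fields)]
  unfold pvS
  rw [pv_sorted_items]
  simp [pvGrp]
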